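-- pv_equiv track=rewrite | github.com/RevanthKanaparthy/MiniProject | ResumeAnalyzer.py | recommend_field
-- ===== SOURCE A (Python) =====
-- def recommend_field(skills):
--     fields = {
--         "Data Science": ["Python", "Machine Learning", "Data Analysis", "SQL", "Statistics", "TensorFlow", "PyTorch"],
--         "Web Development": ["JavaScript", "HTML", "CSS", "React", "Node.js", "Angular", "Vue.js"],
--         "Android Development": ["Java", "Kotlin", "Android SDK", "Mobile Development"],
--         "iOS Development": ["Swift", "Objective-C", "iOS SDK", "Mobile Development"],
--         "UI/UX Design": ["Figma", "Adobe XD", "Sketch", "User Research", "Wireframing"],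
--         "DevOps": ["Docker", "Kubernetes", "AWS", "Azure", "CI/CD", "Jenkins", "Git"],
--         "Cybersecurity": ["Network Security", "Penetration Testing", "Kali Linux", "Cryptography"]
--     }
--
--     # Calculate match score for each field
--     max_match = 0
--     recommended_field = "General Software Development"
--
--     for field, field_skills in fields.items():
--         match = len(set(skills) & set(field_skills))
--         if match > max_match:
--             max_match = match
--             recommended_field = field
--
--     return recommended_field
-- ===== SOURCE B (Python) =====
-- FIELD_ORDER = ["Data Science", "Web Development", "Android Development", "iOS Development",
--                "UI/UX Design", "DevOps", "Cybersecurity"]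
--
-- # Static reverse index precomputed once: skill -> fields whose list contains it.
-- SKILL_INDEX = {
--     "Python": ["Data Science"], "Machine Learning": ["Data Science"], "Data Analysis": ["Data Science"],
--     "SQL": ["Data Science"], "Statistics": ["Data Science"], "TensorFlow": ["Data Science"],
--     "PyTorch": ["Data Science"],
--     "JavaScript": ["Web Development"], "HTML": ["Web Development"], "CSS": ["Web Development"],
--     "React": ["Web Development"], "Node.js": ["Web Development"], "Angular": ["Web Development"],
--     "Vue.js": ["Web Development"],
--     "Java": ["Android Development"], "Kotlin": ["Android Development"], "Android SDK": ["Android Development"],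
--     "Mobile Development": ["Android Development", "iOS Development"],
--     "Swift": ["iOS Development"], "Objective-C": ["iOS Development"], "iOS SDK": ["iOS Development"],
--     "Figma": ["UI/UX Design"], "Adobe XD": ["UI/UX Design"], "Sketch": ["UI/UX Design"],
--     "User Research": ["UI/UX Design"], "Wireframing": ["UI/UX Design"],
--     "Docker": ["DevOps"], "Kubernetes": ["DevOps"], "AWS": ["DevOps"], "Azure": ["DevOps"],
--     "CI/CD": ["DevOps"], "Jenkins": ["DevOps"], "Git": ["DevOps"],
--     "Network Security": ["Cybersecurity"], "Penetration Testing": ["Cybersecurity"],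
--     "Kali Linux": ["Cybersecurity"], "Cryptography": ["Cybersecurity"],
-- }
--
--
-- def recommend_field(skills):
--     # Tally per-field matches in one pass over the distinct input skills.
--     counts = {f: 0 for f in FIELD_ORDER}
--     for s in set(skills):
--         for f in SKILL_INDEX.get(s, []):
--             counts[f] += 1
--     # First field (insertion order) with the maximal tally; default when nothing matched.
--     best = max(FIELD_ORDER, key=lambda f: counts[f])
--     return best if counts[best] > 0 else "General Software Development"
-- ===== Notes on version B (the rewrite author's own statement) =====
-- stated objective: faster
-- what changed: Replaces A's per-field set intersections (set(skills) rebuilt and intersected for every field) with a precomputed static reverse index (skill -> fields), a single tally pass over the distinct input skills incrementing per-field counters, and a final max-by-key selection over the field order with the zero-match default.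
import Mathlib
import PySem

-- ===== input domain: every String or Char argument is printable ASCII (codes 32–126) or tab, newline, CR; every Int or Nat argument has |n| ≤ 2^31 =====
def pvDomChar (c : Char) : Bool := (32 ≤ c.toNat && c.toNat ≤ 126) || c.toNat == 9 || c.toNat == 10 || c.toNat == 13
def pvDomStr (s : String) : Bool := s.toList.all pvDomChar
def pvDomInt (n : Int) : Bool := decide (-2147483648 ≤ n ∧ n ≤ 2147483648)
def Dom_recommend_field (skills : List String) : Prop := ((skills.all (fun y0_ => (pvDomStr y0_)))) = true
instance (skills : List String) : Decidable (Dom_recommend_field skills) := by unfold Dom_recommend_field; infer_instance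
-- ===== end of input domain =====

-- B replaces A's per-field set intersections with a precomputed static reverse index
-- (skill → fields), one tally pass over the distinct input skills, and a max-by-key
-- selection; result proved equal.

-- ===== PORT A =====
-- the fields dict of A, in insertion order
def fieldsTable : List (String × List String) := [
  ("Data Science", ["Python", "Machine Learning", "Data Analysis", "SQL", "Statistics", "TensorFlow", "PyTorch"]),
  ("Web Development", ["JavaScript", "HTML", "CSS", "React", "Node.js", "Angular", "Vue.js"]),
  ("Android Development", ["Java", "Kotlin", "Android SDK", "Mobile Development"]),
  ("iOS Development", ["Swift", "Objective-C", "iOS SDK", "Mobile Development"]),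
  ("UI/UX Design", ["Figma", "Adobe XD", "Sketch", "User Research", "Wireframing"]),
  ("DevOps", ["Docker", "Kubernetes", "AWS", "Azure", "CI/CD", "Jenkins", "Git"]),
  ("Cybersecurity", ["Network Security", "Penetration Testing", "Kali Linux", "Cryptography"])]

-- for field, field_skills in fields.items(): match = len(set(skills) & set(field_skills)); if match > max_match: …
def recommend_field (skills : List String) : String :=
  (fieldsTable.foldl
    (fun (st : Int × String) fv =>
      let m : Int := PySem.Set.len (PySem.Set.inter (PySem.Set.ofList skills) (PySem.Set.ofList fv.2))
      if m > st.1 then (m, fv.1) else st)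
    ((0 : Int), "General Software Development")).2

-- ===== PORT B =====
-- FIELD_ORDER
def fieldOrder : List String := ["Data Science", "Web Development", "Android Development",
  "iOS Development", "UI/UX Design", "DevOps", "Cybersecurity"]

-- SKILL_INDEX: the static reverse index literal of Source B (skill → fields listing it)
def skillIndexB : PySem.Dict String (List String) := PySem.Dict.mk [
  ("Python", ["Data Science"]), ("Machine Learning", ["Data Science"]), ("Data Analysis", ["Data Science"]),
  ("SQL", ["Data Science"]), ("Statistics", ["Data Science"]), ("TensorFlow", ["Data Science"]),
  ("PyTorch", ["Data Science"]),
  ("JavaScript", ["Web Development"]), ("HTML", ["Web Development"]), ("CSS", ["Web Development"]),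
  ("React", ["Web Development"]), ("Node.js", ["Web Development"]), ("Angular", ["Web Development"]),
  ("Vue.js", ["Web Development"]),
  ("Java", ["Android Development"]), ("Kotlin", ["Android Development"]), ("Android SDK", ["Android Development"]),
  ("Mobile Development", ["Android Development", "iOS Development"]),
  ("Swift", ["iOS Development"]), ("Objective-C", ["iOS Development"]), ("iOS SDK", ["iOS Development"]),
  ("Figma", ["UI/UX Design"]), ("Adobe XD", ["UI/UX Design"]), ("Sketch", ["UI/UX Design"]),
  ("User Research", ["UI/UX Design"]), ("Wireframing", ["UI/UX Design"]),
  ("Docker", ["DevOps"]), ("Kubernetes", ["DevOps"]), ("AWS", ["DevOps"]), ("Azure", ["DevOps"]),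
  ("CI/CD", ["DevOps"]), ("Jenkins", ["DevOps"]), ("Git", ["DevOps"]),
  ("Network Security", ["Cybersecurity"]), ("Penetration Testing", ["Cybersecurity"]),
  ("Kali Linux", ["Cybersecurity"]), ("Cryptography", ["Cybersecurity"])]

-- inner loop: for f in SKILL_INDEX.get(s, []): counts[f] += 1
def bumpFields : List String → PySem.Dict String Int → PySem.Dict String Int
  | [], c => c
  | f :: fs, c => bumpFields fs (c.modify f 0 (· + 1))

-- outer loop: for s in set(skills): …  (the counts dict is only looked up afterwards,
-- so the set's iteration order cannot matter)
def tallySkills : List String → PySem.Dict String Int → PySem.Dict String Int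
  | [], c => c
  | s :: ss, c => tallySkills ss (bumpFields (skillIndexB.getD s []) c)

-- Python's max(iterable, key=…): running (best key, best item) pair, replaced only on
-- strictly greater key, so the FIRST maximal element wins (hand port, exact)
def pymaxKey (k : String → Int) : Int × String → List String → Int × String
  | b, [] => b
  | b, f :: fs => pymaxKey k (if k f > b.1 then (k f, f) else b) fs

def recommend_field_alt (skills : List String) : String :=
  -- counts = {f: 0 for f in FIELD_ORDER}, then the tally pass
  let counts := tallySkills (PySem.Set.ofList skills)
    (PySem.Dict.ofList (fieldOrder.map (fun f => (f, (0 : Int)))))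
  let k : String → Int := fun f => counts.getD f 0
  -- best = max(FIELD_ORDER, key=…): the nonempty literal unrolled to head :: tail
  let best := (pymaxKey k (k "Data Science", "Data Science") fieldOrder.tail).2
  if k best > 0 then best else "General Software Development"

-- ===== PRECONDITION & SPEC =====
def Spec_recommend_field (skills : List String) (out : String) : Prop := out = recommend_field_alt skills
instance (skills : List String) (out : String) : Decidable (Spec_recommend_field skills out) := by unfold Spec_recommend_field; infer_instance

-- ===== CLAIM (what is proved, stated in full; the proofs are below) =====
def Claim_equal_recommend_field : Prop := ∀ (skills : List String), Dom_recommend_field skills → Spec_recommend_field skills (recommend_field skills)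

-- ===== LEMMAS AND PROOFS =====

-- the inner bump loop, seen through getD
lemma bump_getD (fs : List String) (c : PySem.Dict String Int) (F : String) :
    (bumpFields fs c).getD F 0 = c.getD F 0 + (fs.count F : Int) := by
  induction fs generalizing c with
  | nil => simp [bumpFields]
  | cons f fs ih =>
    simp only [bumpFields, ih, PySem.Dict.getD_modify, List.count_cons]
    by_cases h : F = f
    · simp [h]; omega
    · simp [h, beq_eq_false_iff_ne.mpr (fun hh => h hh.symm)]

-- the whole tally pass
lemma tally_getD (ds : List String) (c : PySem.Dict String Int) (F : String) :
    (tallySkills ds c).getD F 0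
      = c.getD F 0 + (ds.map (fun s => ((skillIndexB.getD s []).count F : Int))).sum := by
  induction ds generalizing c with
  | nil => simp [tallySkills]
  | cons s ds ih => simp only [tallySkills, ih, bump_getD, List.map_cons, List.sum_cons]; ring

-- a skill outside the index scores 0 for a row all of whose skills are indexed
lemma idx_row (F : String) (fs : List String)
    (hsub : ∀ x ∈ fs, x ∈ skillIndexB.keys)
    (hin : ∀ s ∈ skillIndexB.keys, ((skillIndexB.getD s []).count F : Int) = if s ∈ fs then 1 else 0)
    (s : String) : ((skillIndexB.getD s []).count F : Int) = if s ∈ fs then 1 else 0 := by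
  by_cases hs : s ∈ skillIndexB.keys
  · exact hin s hs
  · have h0 : skillIndexB.get? s = none := by rw [PySem.Dict.get?_eq_none_iff_not_mem_keys]; exact hs
    have hnot : s ∉ fs := fun h => hs (hsub s h)
    simp [PySem.Dict.getD_eq_get?_getD, h0, hnot]

-- for a row of A's table, the literal index counts that field once iff the skill is in the row
set_option maxHeartbeats 2000000 in
lemma idx_count (fv : String × List String) (hfv : fv ∈ fieldsTable) (s : String) :
    ((skillIndexB.getD s []).count fv.1 : Int) = if s ∈ fv.2 then 1 else 0 := by
  simp only [fieldsTable, List.mem_cons, List.not_mem_nil, or_false] at hfv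
  rcases hfv with rfl | rfl | rfl | rfl | rfl | rfl | rfl <;>
    exact idx_row _ _ (by decide) (by decide) s

-- every field starts with tally 0
set_option maxRecDepth 4096 in
lemma init_getD (F : String) :
    (PySem.Dict.ofList (fieldOrder.map (fun f => (f, (0 : Int))))).getD F 0 = 0 := by
  have h : PySem.Dict.ofList (fieldOrder.map (fun f => (f, (0 : Int))))
      = PySem.Dict.mk [("Data Science", 0), ("Web Development", 0), ("Android Development", 0),
          ("iOS Development", 0), ("UI/UX Design", 0), ("DevOps", 0), ("Cybersecurity", 0)] := by decide
  rw [h]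
  simp only [PySem.Dict.getD_eq_get?_getD, PySem.Dict.get?_mk_cons]
  split_ifs <;> rfl

-- a 0/1 membership sum is the length of the intersection filter
lemma sum_ite_mem (ds fs : List String) :
    (ds.map (fun s => if s ∈ fs then (1 : Int) else 0)).sum
      = ((ds.filter (fun x => PySem.Set.contains (PySem.Set.ofList fs) x)).length : Int) := by
  induction ds with
  | nil => simp
  | cons s ds ih =>
    by_cases h : s ∈ fs <;>
        (simp [ih, PySem.Set.contains_eq_listContains, PySem.Set.mem_ofList, h]; try omega)

-- B's tally for each field = A's intersection size for that field
lemma counts_eq (skills : List String) (F : String) (fs : List String)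
    (hfv : (F, fs) ∈ fieldsTable) :
    (tallySkills (PySem.Set.ofList skills)
        (PySem.Dict.ofList (fieldOrder.map (fun f => (f, (0 : Int)))))).getD F 0
      = PySem.Set.len (PySem.Set.inter (PySem.Set.ofList skills) (PySem.Set.ofList fs)) := by
  rw [tally_getD, init_getD]
  rw [List.map_congr_left (fun s _ => idx_count (F, fs) hfv s)]
  rw [sum_ite_mem]
  simp only [Int.zero_add]
  rfl

-- pymaxKey's running best key never decreases
lemma pymax_fst_mono (k : String → Int) (l : List String) (b : Int × String) :
    b.1 ≤ (pymaxKey k b l).1 := by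
  induction l generalizing b with
  | nil => simp [pymaxKey]
  | cons f fs ih =>
    simp only [pymaxKey]
    by_cases h : k f > b.1
    · simp only [h, if_pos]; exact le_trans (le_of_lt h) (ih _)
    · simp only [h]; exact ih b

-- the running pair stays consistent: stored key = key of stored item
lemma pymax_keyinv (k : String → Int) (l : List String) (b : Int × String) (hb : b.1 = k b.2) :
    (pymaxKey k b l).1 = k (pymaxKey k b l).2 := by
  induction l generalizing b with
  | nil => simpa [pymaxKey] using hb
  | cons f fs ih =>
    simp only [pymaxKey]
    by_cases h : k f > b.1
    · simp only [h, if_pos]; exact ih _ rfl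
    · simp only [h]; exact ih b hb

-- either nothing beats the initial key (both runs stay put), or the two runs coincide
-- and strictly improve on it — the initial ITEM is then irrelevant
lemma pymax_cases (k : String → Int) (l : List String) (m : Int) (r r' : String) :
    (pymaxKey k (m, r) l = (m, r) ∧ pymaxKey k (m, r') l = (m, r'))
    ∨ (pymaxKey k (m, r) l = pymaxKey k (m, r') l ∧ m < (pymaxKey k (m, r) l).1) := by
  induction l with
  | nil => left; exact ⟨rfl, rfl⟩
  | cons f fs ih =>
    by_cases h : k f > m
    · right
      have e1 : pymaxKey k (m, r) (f :: fs) = pymaxKey k (k f, f) fs := by simp [pymaxKey, h]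
      have e2 : pymaxKey k (m, r') (f :: fs) = pymaxKey k (k f, f) fs := by simp [pymaxKey, h]
      rw [e1, e2]
      exact ⟨rfl, lt_of_lt_of_le h (pymax_fst_mono k fs (k f, f))⟩
    · have e1 : pymaxKey k (m, r) (f :: fs) = pymaxKey k (m, r) fs := by simp [pymaxKey, h]
      have e2 : pymaxKey k (m, r') (f :: fs) = pymaxKey k (m, r') fs := by simp [pymaxKey, h]
      rw [e1, e2]
      exact ih

-- A's fold over the table IS pymaxKey over the field names, once each row's score
-- equals the key of its name
lemma fold_eq_pymax (tab : List (String × List String)) (score : String × List String → Int)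
    (k : String → Int) (st : Int × String) (h : ∀ fv ∈ tab, score fv = k fv.1) :
    tab.foldl (fun st fv => if score fv > st.1 then (score fv, fv.1) else st) st
      = pymaxKey k st (tab.map Prod.fst) := by
  induction tab generalizing st with
  | nil => rfl
  | cons fv tab ih =>
    have hh : ∀ x ∈ tab, score x = k x.1 := fun x hx => h x (List.mem_cons_of_mem _ hx)
    simp only [List.foldl_cons, List.map_cons, pymaxKey]
    rw [h fv (by simp)]
    exact ih _ hh

-- ===== VERDICT (by name: the statement is the Claim_ definition above) =====
theorem recommend_field_spec : Claim_equal_recommend_field := by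
  intro skills _
  show recommend_field skills = recommend_field_alt skills
  rw [recommend_field, recommend_field_alt]
  set counts := tallySkills (PySem.Set.ofList skills)
    (PySem.Dict.ofList (fieldOrder.map (fun f => (f, (0 : Int))))) with hc
  set k : String → Int := fun f => counts.getD f 0 with hk
  have hscore : ∀ fv ∈ fieldsTable,
      PySem.Set.len (PySem.Set.inter (PySem.Set.ofList skills) (PySem.Set.ofList fv.2)) = k fv.1 := by
    intro fv hfv
    obtain ⟨F, fs⟩ := fv
    rw [hk]
    exact (counts_eq skills F fs hfv).symm
  rw [fold_eq_pymax fieldsTable _ k _ hscore]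
  have hDS0 : 0 ≤ k "Data Science" := by
    rw [hk]
    show 0 ≤ counts.getD "Data Science" 0
    rw [hc, counts_eq skills "Data Science"
      ["Python", "Machine Learning", "Data Analysis", "SQL", "Statistics", "TensorFlow", "PyTorch"]
      (by simp [fieldsTable])]
    simp [PySem.Set.len]
  have honames : fieldsTable.map Prod.fst
      = "Data Science" :: fieldOrder.tail := by rfl
  rw [honames]
  simp only [pymaxKey]
  by_cases hpos : k "Data Science" > 0
  · rw [if_pos hpos]
    have hinv := pymax_keyinv k fieldOrder.tail (k "Data Science", "Data Science") rfl
    have hmono := pymax_fst_mono k fieldOrder.tail (k "Data Science", "Data Science")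
    rw [if_pos (by rw [← hinv]; exact lt_of_lt_of_le hpos hmono)]
  · rw [if_neg hpos]
    have hz : k "Data Science" = 0 := le_antisymm (by omega) hDS0
    rw [hz]
    rcases pymax_cases k fieldOrder.tail 0 "General Software Development" "Data Science" with
      ⟨h1, h2⟩ | ⟨heq, hlt⟩
    · rw [h1, h2]
      simp [hz]
    · have hinv := pymax_keyinv k fieldOrder.tail ((0 : Int), "Data Science") hz.symm
      rw [heq, if_pos (by rw [← hinv, ← heq]; exact hlt)]
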